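-- pv_equiv track=rewrite | github.com/lbarto12/Advent-Of-Code-2024 | Day 15/main.py | try_step
-- ===== SOURCE A (Python) =====
-- from typing import List, Tuple, Dict, Set
--
-- Board = List[List[chr]]
--
-- Coord = Velocity = Tuple[int, int]
--
-- Coord = Velocity = Tuple[int, int]
--
-- def t_add(a: Tuple[int, int], b: Tuple[int, int]) -> Tuple[int, int]:
--     return a[0] + b[0], a[1] + b[1]
--
-- def try_step(board: Board, pos: Coord, v: Velocity, nxt: chr) -> bool:
--     x, y = t_add(pos, v)
--     if board[y][x] == '#':
--         return False
--     if board[y][x] == '.':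
--         board[y][x] = nxt
--         return True
--     if v := try_step(board, (x, y), v, board[y][x]):
--         board[y][x] = nxt
--     return v
-- ===== SOURCE B (Python) =====
-- def try_step(board, pos, v, nxt):
--     # Phase 1: scan forward along v (no mutation), collecting the chain of box
--     # characters to shift; stop at the first '.' or '#'.
--     x, y = pos[0] + v[0], pos[1] + v[1]
--     chars = [nxt]
--     while board[y][x] not in ('.', '#'):
--         chars.append(board[y][x])
--         x += v[0]
--         y += v[1]
--     if board[y][x] == '#':
--         return False
--     # Phase 2: success - write the shifted chain back, all at once.
--     x, y = pos[0] + v[0], pos[1] + v[1]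
--     for c in chars:
--         board[y][x] = c
--         x += v[0]
--         y += v[1]
--     return True
-- ===== Notes on version B (the rewrite author's own statement) =====
-- stated objective: alternative
-- what changed: Recursion is replaced by an explicit two-phase iterative scan: first walk forward collecting the chain of box characters without touching the board, then (only on success) write the shifted chain back in one pass.
import Mathlib
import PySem

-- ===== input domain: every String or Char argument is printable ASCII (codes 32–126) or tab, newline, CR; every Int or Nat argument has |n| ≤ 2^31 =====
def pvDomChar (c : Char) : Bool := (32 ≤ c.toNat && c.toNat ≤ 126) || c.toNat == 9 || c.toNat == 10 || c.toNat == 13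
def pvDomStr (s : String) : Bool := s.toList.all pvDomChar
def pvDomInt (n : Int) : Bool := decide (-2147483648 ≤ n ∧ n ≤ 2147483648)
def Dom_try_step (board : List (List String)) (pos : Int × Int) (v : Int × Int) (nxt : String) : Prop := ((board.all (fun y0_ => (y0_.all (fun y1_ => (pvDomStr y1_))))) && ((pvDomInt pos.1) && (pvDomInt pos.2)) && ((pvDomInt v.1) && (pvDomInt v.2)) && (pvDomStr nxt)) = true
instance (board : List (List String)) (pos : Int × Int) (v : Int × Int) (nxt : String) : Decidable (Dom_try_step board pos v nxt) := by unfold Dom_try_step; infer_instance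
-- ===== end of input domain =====

-- B replaces A's recursion with a two-phase iterative scan (scan, then write back the shifted
-- chain); A and B mutate `board` identically on success — the equivalence proved here is about
-- the RETURN value only (the Lean ports take the board immutably).

-- board[y][x] with Python's negative-index semantics (none = IndexError)
def pvCell (board : List (List String)) (y x : Int) : Option String :=
  (PySem.List.pyGet? board y).bind (fun row => PySem.List.pyGet? row x)

-- a fuel bound large enough for every terminating scan (see Pre_try_step)
def pvFuel (board : List (List String)) : Nat :=
  2 * board.length + 2 * board.foldl (fun m r => max m r.length) 0 + 2

-- ===== PORT A =====
-- literal transliteration of A's recursion (fuel-bounded; pvFuel suffices on Pre_try_step)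
def tryStepGo : Nat → List (List String) → Int × Int → Int × Int → String → Bool
  | 0, _, _, _, _ => false
  | f + 1, board, pos, v, nxt =>
    let x := pos.1 + v.1
    let y := pos.2 + v.2
    match pvCell board y x with
    | none => false                       -- IndexError: excluded by Pre_try_step
    | some c =>
      if c = "#" then false
      else if c = "." then true           -- Python also writes nxt here (mutation, not modelled)
      else tryStepGo f board (x, y) v c   -- recurse with nxt := board[y][x]
-- `nxt` only affects the mutation, never the returned Bool; it is threaded for fidelity
def try_step (board : List (List String)) (pos : Int × Int) (v : Int × Int) (nxt : String) : Bool :=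
  tryStepGo (pvFuel board) board pos v nxt

-- ===== PORT B =====
-- B's phase-1 while-loop: walk forward collecting the chain of box characters,
-- return the stopping coordinates and the collected chain (none = IndexError / fuel out)
def scanChain : Nat → List (List String) → Int → Int → Int × Int → List String →
    Option (Int × Int × List String)
  | 0, _, _, _, _, _ => none
  | f + 1, board, x, y, v, chars =>
    match pvCell board y x with
    | none => none                        -- IndexError: excluded by Pre_try_step
    | some c =>
      if c = "." ∨ c = "#" then some (x, y, chars)
      else scanChain f board (x + v.1) (y + v.2) v (chars ++ [c])
-- B's tail: wall check, then (in Python) the write-back of the shifted chain and `return True`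
def try_step_alt (board : List (List String)) (pos : Int × Int) (v : Int × Int) (nxt : String) : Bool :=
  match scanChain (pvFuel board) board (pos.1 + v.1) (pos.2 + v.2) v [nxt] with
  | none => false
  | some (x, y, _chars) =>
    match pvCell board y x with
    | some c => if c = "#" then false else true   -- phase 2 mutates board; returns True
    | none => false

-- ===== PRECONDITION & SPEC =====
-- Pre_: the ray pos + k*v (k ≥ 1) reaches a '.' or '#' cell while every index on the way is
-- valid for Python (wraparound included). Exactly there A returns normally; outside, A raises
-- IndexError (the ray leaves the board) or RecursionError (v = (0,0) on a box cell).
def Pre_try_step (board : List (List String)) (pos : Int × Int) (v : Int × Int) (nxt : String) : Prop :=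
  ∃ k ∈ List.range (pvFuel board), 1 ≤ k ∧
    (∀ j ∈ List.range k, 1 ≤ j → (pvCell board (pos.2 + j * v.2) (pos.1 + j * v.1)).isSome) ∧
    (pvCell board (pos.2 + k * v.2) (pos.1 + k * v.1) = some "." ∨
     pvCell board (pos.2 + k * v.2) (pos.1 + k * v.1) = some "#")
instance (board : List (List String)) (pos : Int × Int) (v : Int × Int) (nxt : String) : Decidable (Pre_try_step board pos v nxt) := by unfold Pre_try_step; infer_instance

def pvWitness_try_step : List (List String) × (Int × Int) × (Int × Int) × String :=
  ([["@", "O", "."]], (0, 0), (1, 0), "@")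

def Spec_try_step (board : List (List String)) (pos : Int × Int) (v : Int × Int) (nxt : String) (out : Bool) : Prop := out = try_step_alt board pos v nxt
instance (board : List (List String)) (pos : Int × Int) (v : Int × Int) (nxt : String) (out : Bool) : Decidable (Spec_try_step board pos v nxt out) := by unfold Spec_try_step; infer_instance

-- ===== CLAIM (what is proved, stated in full; the proofs are below) =====
def Claim_equal_try_step : Prop := ∀ (board : List (List String)) (pos : Int × Int) (v : Int × Int) (nxt : String), Dom_try_step board pos v nxt → Pre_try_step board pos v nxt → Spec_try_step board pos v nxt (try_step board pos v nxt)

-- ===== LEMMAS AND PROOFS =====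
-- A's recursion equals B's scan-then-check, for every fuel and any accumulated chain.
theorem tryStepGo_eq_scan (f : Nat) (board : List (List String)) (pos : Int × Int)
    (v : Int × Int) (nxt : String) (chars : List String) :
    tryStepGo f board pos v nxt =
      (match scanChain f board (pos.1 + v.1) (pos.2 + v.2) v chars with
       | none => false
       | some (x, y, _c) =>
         match pvCell board y x with
         | some c => if c = "#" then false else true
         | none => false) := by
  induction f generalizing pos nxt chars with
  | zero => simp [tryStepGo, scanChain]
  | succ f ih =>
    simp only [tryStepGo, scanChain]
    cases h : pvCell board (pos.2 + v.2) (pos.1 + v.1) with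
    | none => simp
    | some c =>
      by_cases h1 : c = "#"
      · simp [h1, h]
      · by_cases h2 : c = "."
        · simp [h2, h]
        · simp only [h1, h2, or_self, if_false]
          simpa using ih (pos.1 + v.1, pos.2 + v.2) c (chars ++ [c])

-- ===== VERDICT (by name: the statement is the Claim_ definition above) =====
theorem try_step_spec : Claim_equal_try_step := by
  intro board pos v nxt _hDom _hPre
  unfold Spec_try_step try_step try_step_alt
  exact tryStepGo_eq_scan (pvFuel board) board pos v nxt [nxt]
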